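-- pv_equiv track=rewrite | github.com/ecousadba4-pixel/ai-chatbot-u4s | backend/app.py | _replace_system_prompt
-- ===== SOURCE A (Python) =====
-- from typing import Any, Iterable, Sequence
--
-- ChatModelMessage = dict[str, str]
--
-- def _replace_system_prompt(
--     messages: Sequence[ChatModelMessage], new_prompt: str
-- ) -> list[ChatModelMessage]:
--     replaced: list[ChatModelMessage] = []
--     system_set = False
--     for message in messages:
--         role = message.get("role")
--         if role == "system":
--             if not system_set:
--                 replaced.append({"role": "system", "content": new_prompt})
--                 system_set = True
--             continue
--         replaced.append({"role": str(role), "content": str(message.get("content", "")).strip()})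
--
--     if not system_set:
--         replaced.insert(0, {"role": "system", "content": new_prompt})
--     return replaced
-- ===== SOURCE B (Python) =====
-- def _replace_system_prompt(messages, new_prompt):
--     body = [
--         {"role": str(m.get("role")), "content": str(m.get("content", "")).strip()}
--         for m in messages
--         if m.get("role") != "system"
--     ]
--     idx = next((i for i, m in enumerate(messages) if m.get("role") == "system"), None)
--     body.insert(0 if idx is None else idx, {"role": "system", "content": new_prompt})
--     return body
-- ===== Notes on version B (the rewrite author's own statement) =====
-- stated objective: alternative
-- what changed: B splits the work into two passes: a filter+map comprehension builds the transformed non-system body, then the index of the first system message is found separately and the single system prompt is inserted at that index (or 0), replacing A's one-pass loop with a seen-system flag and conditional front-insert.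
import Mathlib
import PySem

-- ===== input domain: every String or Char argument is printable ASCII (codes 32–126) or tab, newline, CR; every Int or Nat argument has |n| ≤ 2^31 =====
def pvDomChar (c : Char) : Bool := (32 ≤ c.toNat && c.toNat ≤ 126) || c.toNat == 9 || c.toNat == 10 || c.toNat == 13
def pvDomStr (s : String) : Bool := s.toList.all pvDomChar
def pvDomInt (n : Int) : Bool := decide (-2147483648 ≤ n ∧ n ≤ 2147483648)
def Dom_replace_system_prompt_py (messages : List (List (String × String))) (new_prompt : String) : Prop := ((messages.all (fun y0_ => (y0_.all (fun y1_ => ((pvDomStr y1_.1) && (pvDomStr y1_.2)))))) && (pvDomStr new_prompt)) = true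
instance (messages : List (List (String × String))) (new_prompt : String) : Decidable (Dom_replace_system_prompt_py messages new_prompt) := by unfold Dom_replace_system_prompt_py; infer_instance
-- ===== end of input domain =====

-- B builds the transformed non-system body by a comprehension, then inserts the system
-- prompt at the separately-found index of the first system message (alternative decomposition).
-- Dicts are association lists (first-match lookup); dict.get is modelled by pvGet.

-- shared message-shape helpers (the same Python dict expressions appear in both A and B)
def pvGet (m : List (String × String)) (k : String) : Option String :=
  (m.find? (fun p => p.1 == k)).map (·.2)

-- str(o) for an Optional[str]: str(None) = "None"
def pvStr (o : Option String) : String :=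
  match o with
  | none => "None"
  | some s => s

def pvSysMsg (np : String) : List (String × String) :=
  [("role", "system"), ("content", np)]

def pvMk (m : List (String × String)) : List (String × String) :=
  [("role", pvStr (pvGet m "role")), ("content", PySem.Str.strip ((pvGet m "content").getD ""))]

-- ===== PORT A =====
def pvStepA (np : String) (st : List (List (String × String)) × Bool) (message : List (String × String)) :
    List (List (String × String)) × Bool :=
  let role := pvGet message "role"
  if role == some "system" then
    (if st.2 = false then (st.1 ++ [pvSysMsg np], true) else st)
  else
    (st.1 ++ [pvMk message], st.2)

def replace_system_prompt_py (messages : List (List (String × String))) (new_prompt : String) : List (List (String × String)) :=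
  let r := messages.foldl (pvStepA new_prompt) ([], false)
  if r.2 = false then pvSysMsg new_prompt :: r.1 else r.1

-- ===== PORT B =====
def replace_system_prompt_py_alt (messages : List (List (String × String))) (new_prompt : String) : List (List (String × String)) :=
  let body := (messages.filter (fun m => !(pvGet m "role" == some "system"))).map pvMk
  match messages.findIdx? (fun m => pvGet m "role" == some "system") with
  | none => pvSysMsg new_prompt :: body
  | some i => body.insertIdx i (pvSysMsg new_prompt)

-- ===== PRECONDITION & SPEC =====
def Spec_replace_system_prompt_py (messages : List (List (String × String))) (new_prompt : String) (out : List (List (String × String))) : Prop := out = replace_system_prompt_py_alt messages new_prompt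
instance (messages : List (List (String × String))) (new_prompt : String) (out : List (List (String × String))) : Decidable (Spec_replace_system_prompt_py messages new_prompt out) := by unfold Spec_replace_system_prompt_py; infer_instance

-- ===== CLAIM (what is proved, stated in full; the proofs are below) =====
def Claim_equal_replace_system_prompt_py : Prop := ∀ (messages : List (List (String × String))) (new_prompt : String), Dom_replace_system_prompt_py messages new_prompt → Spec_replace_system_prompt_py messages new_prompt (replace_system_prompt_py messages new_prompt)

-- ===== LEMMAS AND PROOFS =====

-- once the flag is set, A just appends the transformed non-system messages
theorem pv_fold_true (np : String) (ms : List (List (String × String)))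
    (acc : List (List (String × String))) :
    ms.foldl (pvStepA np) (acc, true) =
      (acc ++ (ms.filter (fun m => !(pvGet m "role" == some "system"))).map pvMk, true) := by
  induction ms generalizing acc with
  | nil => simp
  | cons m rest ih =>
    by_cases h : (pvGet m "role" == some "system") = true
    · simp [pvStepA, h, ih]
    · simp only [Bool.not_eq_true] at h
      simp [pvStepA, h, ih]

-- before the flag is set, A's fold computes exactly B's body with the system prompt
-- inserted at the index of the first system message (if any)
theorem pv_fold_false (np : String) (ms : List (List (String × String)))
    (acc : List (List (String × String))) :
    ms.foldl (pvStepA np) (acc, false) =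
      (match ms.findIdx? (fun m => pvGet m "role" == some "system") with
       | none => (acc ++ (ms.filter (fun m => !(pvGet m "role" == some "system"))).map pvMk, false)
       | some i => (acc ++ ((ms.filter (fun m => !(pvGet m "role" == some "system"))).map pvMk).insertIdx i (pvSysMsg np), true)) := by
  induction ms generalizing acc with
  | nil => simp
  | cons m rest ih =>
    by_cases h : (pvGet m "role" == some "system") = true
    · simp [pvStepA, h, List.findIdx?_cons, pv_fold_true]
    · simp only [Bool.not_eq_true] at h
      simp only [List.foldl_cons, pvStepA, h, Bool.false_eq_true, if_false, ih,
        List.findIdx?_cons, List.filter_cons, Bool.not_false, if_true, List.map_cons]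
      cases hf : rest.findIdx? (fun m => pvGet m "role" == some "system") with
      | none => simp
      | some j => simp [List.insertIdx_succ_cons]

-- ===== VERDICT (by name: the statement is the Claim_ definition above) =====
theorem replace_system_prompt_py_spec : Claim_equal_replace_system_prompt_py := by
  intro messages new_prompt _
  unfold Spec_replace_system_prompt_py replace_system_prompt_py replace_system_prompt_py_alt
  rw [pv_fold_false]
  cases hf : messages.findIdx? (fun m => pvGet m "role" == some "system") with
  | none => simp
  | some i => simp
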